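-- pv_equiv track=rewrite | github.com/lochbrunner/symbolic-reasoning | flat/generate.py | _create_permutation_samples
-- ===== SOURCE A (Python) =====
-- from string import ascii_lowercase as alphabet
-- from itertools import permutations
--
-- def _create_permutation_samples(length=5):
--     idents = alphabet[:length]
--     classes = []
--     samples = []
--
--     for (i, perm) in enumerate(permutations(idents)):
--         classes.append(i)
--         samples.append((i, perm))
--
--     return samples, list(idents), classes
-- ===== SOURCE B (Python) =====
-- from string import ascii_lowercase as alphabet
--
--
-- def _create_permutation_samples(length=5):
--     idents = alphabet[:length]
--     letters = list(idents)
--     n = len(letters)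
--     facts = [1]
--     for i in range(1, n + 1):
--         facts.append(facts[-1] * i)
--     total = facts[n]
--     samples = []
--     for k in range(total):
--         # decode rank k (factorial number system) into the k-th permutation
--         avail = letters[:]
--         t = []
--         r = k
--         for j in reversed(range(n)):
--             q, r = divmod(r, facts[j])
--             t.append(avail.pop(q))
--         samples.append((k, tuple(t)))
--     return samples, letters, list(range(total))
-- ===== Notes on version B (the rewrite author's own statement) =====
-- stated objective: alternative
-- what changed: Replaces the enumeration of itertools.permutations by direct factorial-number-system decoding: each rank k in range(n!) is decoded on its own into the k-th permutation by repeatedly dividing by factorials and picking the element at the quotient index from the remaining letters.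
import Mathlib
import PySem

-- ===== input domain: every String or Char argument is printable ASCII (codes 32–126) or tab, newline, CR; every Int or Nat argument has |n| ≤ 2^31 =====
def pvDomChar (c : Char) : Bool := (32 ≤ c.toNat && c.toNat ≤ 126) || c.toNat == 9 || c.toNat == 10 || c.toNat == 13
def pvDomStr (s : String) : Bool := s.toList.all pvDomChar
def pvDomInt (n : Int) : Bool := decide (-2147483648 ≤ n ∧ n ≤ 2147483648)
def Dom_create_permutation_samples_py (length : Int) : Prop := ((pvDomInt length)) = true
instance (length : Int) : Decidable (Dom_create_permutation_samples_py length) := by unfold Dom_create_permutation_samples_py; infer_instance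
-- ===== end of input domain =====

-- B replaces the enumeration of itertools.permutations by direct factorial-number-system
-- decoding of each rank k into the k-th permutation (objective: alternative algorithm, same cost).

-- ===== PORT A =====

def pvAlphabet : List Char := "abcdefghijklmnopqrstuvwxyz".toList

-- A: idents = alphabet[:length]; loop over enumerate(permutations(idents)) appending to classes and samples.
def create_permutation_samples_py (length : Int) : (List (Int × List String)) × List String × List Int :=
  let idents : List Char := PySem.List.slice pvAlphabet none (some length)
  -- iterating / list()-ing a Python str yields its 1-character strings
  let identsL : List String := idents.map (fun c => String.ofList [c])
  let perms := PySem.List.permutations identsL identsL.length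
  -- 'for (i, perm) in enumerate(...)' ported as a fold carrying the index i; the two
  -- .append loops accumulate by cons and are reversed at the end (same lists, list-loop idiom)
  let st := perms.foldl
      (fun (st : Int × List Int × List (Int × List String)) perm =>
        (st.1 + 1, st.1 :: st.2.1, (st.1, perm) :: st.2.2)) (0, [], [])
  ((st.2.2).reverse, identsL, (st.2.1).reverse)

-- ===== PORT B =====

-- B (from Source B): facts[i] = i! built by a loop, then each rank k in range(n!) is decoded
-- on its own by the inner loop 'for j in reversed(range(n)): q, r = divmod(r, facts[j]); t.append(avail.pop(q))'.
def create_permutation_samples_py_alt (length : Int) : (List (Int × List String)) × List String × List Int :=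
  let idents : List Char := PySem.List.slice pvAlphabet none (some length)
  let letters : List String := idents.map (fun c => String.ofList [c])
  let n := letters.length
  -- facts = [1]; for i in range(1, n+1): facts.append(facts[-1] * i)
  let facts : List Nat := (List.range' 1 n).foldl (fun fs i => fs ++ [fs.getLastD 1 * i]) [1]
  let total := facts.getD n 0            -- facts[n]; always present
  -- range(total) over nonnegative total: List.range, indices cast to Int; per k the inner
  -- decode loop; avail.pop(q) and facts[j] are in range on every iteration B performs,
  -- so the getD defaults are never used
  let samples := (List.range total).map (fun (k : Nat) =>
    let st := ((List.range n).reverse).foldl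
      (fun (st : List String × List String × Nat) j =>
        let f := facts.getD j 1
        let q := st.2.2 / f
        let r := st.2.2 % f
        let pr := (PySem.List.pop? st.1 (Int.ofNat q)).getD ("", st.1)
        (pr.2, st.2.1 ++ [pr.1], r))
      (PySem.List.slice letters none none, [], k)   -- avail = letters[:]
    ((k : Int), st.2.1))
  (samples, letters, (List.range total).map (fun (k : Nat) => ((k : Int))))

-- ===== PRECONDITION & SPEC =====
def Spec_create_permutation_samples_py (length : Int) (out : (List (Int × List String)) × List String × List Int) : Prop := out = create_permutation_samples_py_alt length
instance (length : Int) (out : (List (Int × List String)) × List String × List Int) : Decidable (Spec_create_permutation_samples_py length out) := by unfold Spec_create_permutation_samples_py; infer_instance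

-- ===== CLAIM (what is proved, stated in full; the proofs are below) =====
def Claim_equal_create_permutation_samples_py : Prop := ∀ (length : Int), Dom_create_permutation_samples_py length → Spec_create_permutation_samples_py length (create_permutation_samples_py length)

-- ===== LEMMAS AND PROOFS =====

-- proof-side description of one decoded permutation (recursive form of B's inner loop)
def nthPermB : Nat → List String → Nat → List String
  | 0, _, _ => []
  | _+1, [], _ => []
  | fuel+1, a :: rest, k =>
    let avail := a :: rest
    let f := Nat.factorial rest.length
    ((avail[k / f]?).getD "") :: nthPermB fuel (avail.eraseIdx (k / f)) (k % f)

theorem range_mul_flatMap (m f : Nat) :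
    List.range (m * f) = (List.range m).flatMap (fun i => (List.range f).map (fun r => i * f + r)) := by
  induction m with
  | zero => simp
  | succ m ih =>
    rw [Nat.succ_mul, List.range_add, List.range_succ, List.flatMap_append, ← ih]
    simp

theorem permutations_succ (xs : List String) (r : Nat) :
    PySem.List.permutations xs (r+1) =
      (List.range xs.length).flatMap (fun i =>
        match xs[i]? with
        | none => []
        | some x => (PySem.List.permutations (xs.eraseIdx i) r).map (fun p => x :: p)) := by
  conv_lhs => rw [PySem.List.permutations]
  apply List.flatMap_congr
  intro i _
  cases hx : xs[i]? <;> simp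

-- the key correspondence: itertools order = factorial-base rank decoding
theorem perms_eq_decode (n : Nat) : ∀ (l : List String), l.length = n →
    PySem.List.permutations l n = (List.range (Nat.factorial n)).map (nthPermB n l) := by
  induction n with
  | zero =>
    intro l hl
    simp [PySem.List.permutations, nthPermB, List.range_succ]
  | succ n ih =>
    intro l hl
    match l, hl with
    | a :: rest, hl =>
    have hn : rest.length = n := by simpa using hl
    have hf : 0 < Nat.factorial n := Nat.factorial_pos n
    rw [Nat.factorial_succ, range_mul_flatMap (n+1) n.factorial, List.map_flatMap,
      permutations_succ, hl]
    apply List.flatMap_congr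
    intro i hi
    have hi' : i < n + 1 := List.mem_range.mp hi
    have hidx : i < (a :: rest).length := by simp [hn]; omega
    have hx : (a :: rest)[i]? = some ((a :: rest)[i]) := List.getElem?_eq_getElem hidx
    rw [hx]
    have hel : ((a :: rest).eraseIdx i).length = n := by
      rw [List.length_eraseIdx, if_pos hidx]
      simp [hn]
    rw [ih _ hel]
    dsimp only
    rw [List.map_map, List.map_map]
    apply List.map_congr_left
    intro r hr
    have hr' : r < n.factorial := List.mem_range.mp hr
    simp only [Function.comp, nthPermB, hn]
    have hq : (i * n.factorial + r) / n.factorial = i := by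
      rw [Nat.mul_comm i, Nat.mul_add_div hf, Nat.div_eq_of_lt hr', Nat.add_zero]
    have hm : (i * n.factorial + r) % n.factorial = r := by
      rw [Nat.mul_comm i, Nat.mul_add_mod, Nat.mod_eq_of_lt hr']
    rw [hq, hm, hx]
    rfl

theorem foldl_count (xs : List (List String)) : ∀ (i : Int) (cs : List Int) (ss : List (Int × List String)),
    xs.foldl (fun st perm => (st.1 + 1, st.1 :: st.2.1, (st.1, perm) :: st.2.2)) (i, cs, ss)
      = (i + xs.length, ((PySem.List.enumerate xs i).map (·.1)).reverse ++ cs,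
          (PySem.List.enumerate xs i).reverse ++ ss) := by
  induction xs with
  | nil => intro i cs ss; simp [PySem.List.enumerate_nil]
  | cons x xs ih =>
    intro i cs ss
    rw [List.foldl_cons, ih, PySem.List.enumerate_cons]
    refine Prod.ext ?_ (Prod.ext ?_ ?_)
    · simp
      ring
    · simp
    · simp

theorem enumerate_map_range {α : Type} (N : Nat) (g : Nat → α) :
    PySem.List.enumerate ((List.range N).map g) 0 = (List.range N).map (fun (k : Nat) => ((k : Int), g k)) := by
  apply List.ext_getElem
  · simp [PySem.List.length_enumerate]
  · intro k h1 h2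
    rw [PySem.List.getElem_enumerate]
    simp

theorem facts_spec (m : Nat) :
    (List.range' 1 m).foldl (fun fs i => fs ++ [fs.getLastD 1 * i]) [1]
      = (List.range (m+1)).map Nat.factorial := by
  induction m with
  | zero => simp [List.range_succ]
  | succ m ih =>
    rw [List.range'_concat, List.foldl_append, ih]
    rw [List.range_succ (n := m + 1), List.map_append]
    simp [List.range_succ, Nat.factorial_succ]
    ring

theorem decode_loop (facts : List Nat) :
    ∀ (m : Nat), (∀ j, j < m → facts.getD j 1 = Nat.factorial j) →
    ∀ (avail t : List String) (r : Nat), avail.length = m → r < Nat.factorial m →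
    (((List.range m).reverse).foldl
      (fun (st : List String × List String × Nat) j =>
        let f := facts.getD j 1
        let q := st.2.2 / f
        let r := st.2.2 % f
        let pr := (PySem.List.pop? st.1 (Int.ofNat q)).getD ("", st.1)
        (pr.2, st.2.1 ++ [pr.1], r)) (avail, t, r)).2.1
      = t ++ nthPermB m avail r := by
  intro m
  induction m with
  | zero =>
    intro _ avail t r hl _
    match avail, hl with
    | [], _ => simp [nthPermB]
  | succ m ih =>
    intro hfacts avail t r hl hr
    match avail, hl with
    | a :: restl, hl =>
    have hm : restl.length = m := by simpa using hl
    have hfp : 0 < Nat.factorial m := Nat.factorial_pos m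
    have hrange : (List.range (m+1)).reverse = m :: (List.range m).reverse := by
      rw [List.range_succ]; simp
    have hfj : facts.getD m 1 = Nat.factorial m := hfacts m (by omega)
    have hq : r / Nat.factorial m < m + 1 := by
      rw [Nat.div_lt_iff_lt_mul hfp]
      calc r < Nat.factorial (m+1) := hr
        _ = (m+1) * Nat.factorial m := Nat.factorial_succ m
    have hq' : r / Nat.factorial m < (a :: restl).length := by simpa [hm] using hq
    have hpop : PySem.List.pop? (a :: restl) (Int.ofNat (r / Nat.factorial m))
        = some ((a :: restl)[r / Nat.factorial m], (a :: restl).eraseIdx (r / Nat.factorial m)) :=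
      PySem.List.pop?_natCast _ _ hq'
    have hel : ((a :: restl).eraseIdx (r / Nat.factorial m)).length = m := by
      rw [List.length_eraseIdx, if_pos hq']
      simp [hm]
    rw [hrange, List.foldl_cons]
    have ih' := ih (fun j hj => hfacts j (by omega))
      ((a :: restl).eraseIdx (r / Nat.factorial m))
      (t ++ [(a :: restl)[r / Nat.factorial m]])
      (r % Nat.factorial m) hel (Nat.mod_lt _ hfp)
    simp only [hfj, hpop, Option.getD_some] at ih' ⊢
    rw [ih']
    simp only [nthPermB, hm]
    rw [List.getElem?_eq_getElem hq']
    simp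

-- ===== VERDICT (by name: the statement is the Claim_ definition above) =====
theorem create_permutation_samples_py_spec : Claim_equal_create_permutation_samples_py := by
  intro length _
  unfold Spec_create_permutation_samples_py create_permutation_samples_py create_permutation_samples_py_alt
  simp only [PySem.List.slice_none_none]
  rw [perms_eq_decode _ _ rfl, foldl_count, facts_spec]
  have hgetD : ∀ (n j : Nat) (d : Nat), j < n + 1 →
      ((List.range (n+1)).map Nat.factorial).getD j d = Nat.factorial j := by
    intro n j d hj
    simp [List.getD, hj]
  rw [hgetD _ _ _ (by omega)]
  refine Prod.ext ?_ (Prod.ext rfl ?_)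
  · simp only [List.append_nil, List.reverse_reverse]
    rw [enumerate_map_range]
    apply List.map_congr_left
    intro k hk
    have hk' := List.mem_range.mp hk
    refine Prod.ext rfl ?_
    simp only []
    rw [decode_loop _ _ (fun j hj => hgetD _ _ _ (by omega)) _ _ _ rfl hk']
    simp
  · simp only [List.append_nil, List.reverse_reverse]
    rw [enumerate_map_range]
    simp [List.map_map]
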